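-- pv_equiv track=rewrite | github.com/edgarshurtado/CodeLearningMaterial | MOOCs/HiddenMessages/hamming_distance.py | computing_freq
-- ===== SOURCE A (Python) =====
-- def pattern_to_number(pattern):
-- 	"""
-- 	>>> pattern_to_number("TGA")
-- 	56
-- 	"""
-- 	n_bases = ["A", "C", "G", "T"]
-- 	number = 0
-- 	for position in range(len(pattern)):
-- 		nb = pattern[position]
-- 		exponent = len(pattern) - position -1
-- 		number += n_bases.index(nb) * (4 ** exponent)
--
-- 	return number
--
-- def number_to_pattern(number, k):
-- 	"""
-- 	Takes a number and returns the pattern of length k that takes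
-- 	the position "number" in a sorted list of patterns of length k
-- 	"""
-- 	n_bases = ["A", "C", "G", "T"]
-- 	pattern = ""
-- 	for i in range(k-1, -1, -1):
-- 		base_index = number / (4**i)
-- 		pattern += n_bases[base_index]
-- 		number -= base_index * 4**i
--
-- 	return pattern
--
-- def hamming_distance(string1, string2):
-- 	assert len(string1) == len(string2), "The strings have to had the same length"
--
-- 	missmatches = 0
--
-- 	for i in range(len(string1)):
-- 		if string1[i] != string2[i]:
-- 			missmatches += 1
--
-- 	return missmatches
--
-- def computing_freq(genome, k, d=0):
-- 	"""
-- 	--> list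
-- 	Returns the frequency array of k-mers in the genome with missmatches
-- 	up to d. d is 0 by default
-- 	"""
-- 	freq_array = []
--
-- 	for i in range(4**k):
-- 		freq_array.append(0)
--
-- 	for i in range(len(genome) - (k - 1)):
-- 		pattern = genome[i : i + k]
-- 		pattern_i = pattern_to_number(pattern)
--
-- 		if d == 0:
-- 			freq_array[pattern_i] += 1
-- 		else:
-- 			for j in range(4**k):
-- 				q_sequence = number_to_pattern(j, k)
-- 				hd = hamming_distance(pattern, q_sequence)
-- 				if hd <= d:
-- 					freq_array[j] += 1
--
-- 	return freq_array
-- ===== SOURCE B (Python) =====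
-- def _pattern_number(pattern):
--     n = 0
--     for c in pattern:
--         n = 4 * n + "ACGT".index(c)
--     return n
--
-- def _neighbor_numbers(pattern, d):
--     """Base-4 numbers of all ACGT strings within Hamming distance d of pattern."""
--     if d < 0:
--         return []
--     if d == 0:
--         return [_pattern_number(pattern)]
--     if pattern == "":
--         return [0]
--     c0 = "ACGT".index(pattern[0])
--     rest = pattern[1:]
--     w = 4 ** len(rest)
--     res = []
--     for b in range(4):
--         dd = d if b == c0 else d - 1
--         for m in _neighbor_numbers(rest, dd):
--             res.append(b * w + m)
--     return res
--
-- def computing_freq(genome, k, d=0):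
--     """
--     --> list
--     Returns the frequency array of k-mers in the genome with missmatches
--     up to d. d is 0 by default
--     """
--     freq_array = [0 for _ in range(4 ** k)]
--     for i in range(len(genome) - k + 1):
--         for j in _neighbor_numbers(genome[i : i + k], d):
--             freq_array[j] += 1
--     return freq_array
-- ===== Notes on version B (the rewrite author's own statement) =====
-- stated objective: alternative
-- what changed: B computes each window's index by a Horner fold (n = 4*n + code) and, for d > 0, enumerates only the d-neighborhood of the observed k-mer recursively, instead of A's per-position power sums and, for d != 0, a scan of all 4^k patterns with a Hamming-distance test per window.
-- outside the precondition, e.g. on computing_freq('A', 1, 1): A raises TypeError, B returns [1, 1, 1, 1]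
-- crash fix: Whenever there is at least one window (1 <= k <= len(genome)) and d != 0, A raises under Python 3 (TypeError from the float list index in number_to_pattern, or ValueError first on a non-ACGT character); on those inputs with ACGT-only text and d > 0 B returns the d-mismatch frequency array, and for d < 0 B returns the all-zero array (no string lies within negative distance). — e.g. on computing_freq("A", 1, 1): A raises TypeError, B returns [1, 1, 1, 1]
import Mathlib
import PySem

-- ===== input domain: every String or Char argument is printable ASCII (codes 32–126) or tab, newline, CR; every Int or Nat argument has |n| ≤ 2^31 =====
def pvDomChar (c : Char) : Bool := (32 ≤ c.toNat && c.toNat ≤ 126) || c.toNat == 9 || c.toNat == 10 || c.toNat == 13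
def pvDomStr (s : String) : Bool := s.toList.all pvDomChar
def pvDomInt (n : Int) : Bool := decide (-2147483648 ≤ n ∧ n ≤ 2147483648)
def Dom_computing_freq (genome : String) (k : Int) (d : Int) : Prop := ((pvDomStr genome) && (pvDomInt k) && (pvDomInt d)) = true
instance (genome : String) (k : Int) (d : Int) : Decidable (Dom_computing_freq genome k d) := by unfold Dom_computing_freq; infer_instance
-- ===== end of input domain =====

-- B replaces A's per-position power sums by a Horner fold and A's full 4^k scan (for d ≠ 0) by a
-- recursive enumeration of the window's d-neighborhood (objective: alternative algorithm).

-- ===== PORT A =====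
-- Ported on the List Char side (genome.toList); helpers mirror Source A one for one.
def pvNBases : List Char := ['A', 'C', 'G', 'T']   -- n_bases = ["A","C","G","T"] (one-char strings as Chars)

-- freq[j] += 1 (this statement appears in both sources); exact for 0 ≤ j < len(freq),
-- the only indices either program reaches inside Pre_ (negative-index wrap never occurs there)
def pyIncrAt (xs : List Int) (j : Int) : List Int := xs.set j.toNat (xs[j.toNat]?.getD 0 + 1)

-- pattern_to_number; n_bases.index(nb) raises ValueError on a non-ACGT char (excluded by Pre_), → .getD 0 junk there;
-- position is always in range so pattern[position] never raises (.getD 'A' junk unreachable)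
def patternToNumber (pattern : List Char) : Int :=
  (PySem.List.pyRange 0 (pattern.length : Int)).foldl (fun number position =>
    let nb := (PySem.List.pyGet? pattern position).getD 'A'
    let exponent := (pattern.length : Int) - position - 1     -- ≥ 0 on every iteration, so 4 ** exponent = 4 ^ exponent.toNat
    number + ((PySem.List.index? pvNBases nb).getD 0 : Int) * 4 ^ exponent.toNat) 0

-- number_to_pattern; under Python 3 `number / (4**i)` is a float, so n_bases[base_index] raises TypeError
-- whenever the loop body runs (k ≥ 1) — all such inputs are outside Pre_. Ported with floor division;
-- exact on the only calls Pre_ admits (k = 0, where the loop is empty).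
def numberToPattern (number : Int) (k : Int) : List Char :=
  ((PySem.List.pyRange (k - 1) (-1) (-1)).foldl (fun (st : Int × List Char) i =>
    let baseIndex := PySem.Int.floordiv st.1 (4 ^ i.toNat)
    (st.1 - baseIndex * 4 ^ i.toNat,
     st.2 ++ [(PySem.List.pyGet? pvNBases baseIndex).getD 'A'])) (number, [])).2

-- hamming_distance; the assert (equal lengths) holds on every call Pre_ admits
def hammingDistance (s1 s2 : List Char) : Int :=
  (PySem.List.pyRange 0 (s1.length : Int)).foldl (fun missmatches i =>
    if (PySem.List.pyGet? s1 i) ≠ (PySem.List.pyGet? s2 i) then missmatches + 1 else missmatches) 0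

-- computing_freq; 4 ** k raises TypeError for k < 0 (excluded by Pre_): ported as 4 ^ k.toNat
def computing_freq (genome : String) (k : Int) (d : Int) : List Int :=
  let g := genome.toList
  let freqArray : List Int :=
    (PySem.List.pyRange 0 ((4:Int) ^ k.toNat)).foldl (fun acc _ => acc ++ [(0:Int)]) []
  (PySem.List.pyRange 0 ((g.length : Int) - (k - 1))).foldl (fun freq i =>
    let pattern := PySem.List.slice g (some i) (some (i + k))
    let patternI := patternToNumber pattern
    if d = 0 then pyIncrAt freq patternI
    else (PySem.List.pyRange 0 ((4:Int) ^ k.toNat)).foldl (fun fr j =>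
      let qSequence := numberToPattern j k
      let hd := hammingDistance pattern qSequence
      if hd ≤ d then pyIncrAt fr j else fr) freq) freqArray

-- ===== PORT B =====
def pvACGT : List Char := ['A', 'C', 'G', 'T']   -- the string "ACGT"

-- "ACGT".index(c); ValueError on a non-ACGT char (excluded by Pre_) → .getD 0 junk there
def codeOf (c : Char) : Int := ((PySem.List.index? pvACGT c).getD 0 : Int)

-- _pattern_number: Horner fold
def patternNumberB (pattern : List Char) : Int :=
  pattern.foldl (fun n c => 4 * n + codeOf c) 0

-- _neighbor_numbers: base-4 numbers of all ACGT strings within Hamming distance d of pattern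
def neighborNumbers (pattern : List Char) (d : Int) : List Int :=
  if d < 0 then []
  else if d = 0 then [patternNumberB pattern]
  else
    match pattern with
    | [] => [0]
    | c :: rest =>
      let c0 := codeOf c
      let w : Int := 4 ^ rest.length          -- 4 ** len(rest), exponent ≥ 0
      let same := neighborNumbers rest d
      let less := neighborNumbers rest (d - 1)
      (PySem.List.pyRange 0 4).foldl (fun res b =>
        (if b = c0 then same else less).foldl (fun r m => r ++ [b * w + m]) res) []

-- computing_freq (B); 4 ** k needs k ≥ 0 (Pre_): ported as 4 ^ k.toNat
def computing_freq_alt (genome : String) (k : Int) (d : Int) : List Int :=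
  let g := genome.toList
  let freqArray : List Int := (PySem.List.pyRange 0 ((4:Int) ^ k.toNat)).map (fun _ => (0:Int))
  (PySem.List.pyRange 0 ((g.length : Int) - k + 1)).foldl (fun freq i =>
    (neighborNumbers (PySem.List.slice g (some i) (some (i + k))) d).foldl
      (fun fr j => pyIncrAt fr j) freq) freqArray

-- ===== PRECONDITION & SPEC =====
-- Pre_ admits exactly the inputs on which A returns: it excludes k < 0 (TypeError on range(4**k)),
-- a non-ACGT character when there is at least one window (ValueError in pattern_to_number), and
-- d ≠ 0 with a window of length ≥ 1 (TypeError: number_to_pattern indexes a list with a float).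
def Pre_computing_freq (genome : String) (k : Int) (d : Int) : Prop :=
  0 ≤ k ∧ ((genome.toList.length : Int) < k ∨ k = 0 ∨
           (genome.toList.all (fun c => pvNBases.contains c) = true ∧ d = 0))
instance (genome : String) (k : Int) (d : Int) : Decidable (Pre_computing_freq genome k d) := by
  unfold Pre_computing_freq; infer_instance

def pvWitness_computing_freq : String × Int × Int := ("ACGT", 2, 0)

-- Whenever there is at least one window (1 ≤ k ≤ len(genome)) and d ≠ 0, A raises under Python 3
-- (TypeError from the float list index in number_to_pattern, or ValueError first on a non-ACGT char);
-- on those inputs with ACGT-only text and d > 0, B returns the d-mismatch frequency array, and for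
-- d < 0 B returns the all-zero array.
def Raises_computing_freq (genome : String) (k : Int) (d : Int) : Prop :=
  1 ≤ k ∧ k ≤ (genome.toList.length : Int) ∧
  (d < 0 ∨ (0 < d ∧ genome.toList.all (fun c => pvNBases.contains c) = true))
instance (genome : String) (k : Int) (d : Int) : Decidable (Raises_computing_freq genome k d) := by
  unfold Raises_computing_freq; infer_instance

def pvRaiseWitness_computing_freq : String × Int × Int := ("A", 1, 1)
def pvRaiseWitnessOut_computing_freq : List Int := [1, 1, 1, 1]

def Spec_computing_freq (genome : String) (k : Int) (d : Int) (out : List Int) : Prop := out = computing_freq_alt genome k d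
instance (genome : String) (k : Int) (d : Int) (out : List Int) : Decidable (Spec_computing_freq genome k d out) := by unfold Spec_computing_freq; infer_instance

-- ===== CLAIM (what is proved, stated in full; the proofs are below) =====
def Claim_equal_computing_freq : Prop := ∀ (genome : String) (k : Int) (d : Int), Dom_computing_freq genome k d → Pre_computing_freq genome k d → Spec_computing_freq genome k d (computing_freq genome k d)

def Claim_raises_computing_freq : Prop := (∀ (genome : String) (k : Int) (d : Int), Dom_computing_freq genome k d → Raises_computing_freq genome k d → ¬ Pre_computing_freq genome k d) ∧ (Dom_computing_freq (pvRaiseWitness_computing_freq.1) (pvRaiseWitness_computing_freq.2.1) (pvRaiseWitness_computing_freq.2.2) ∧ Raises_computing_freq (pvRaiseWitness_computing_freq.1) (pvRaiseWitness_computing_freq.2.1) (pvRaiseWitness_computing_freq.2.2) ∧ computing_freq_alt (pvRaiseWitness_computing_freq.1) (pvRaiseWitness_computing_freq.2.1) (pvRaiseWitness_computing_freq.2.2) = pvRaiseWitnessOut_computing_freq)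

-- ===== LEMMAS AND PROOFS =====

theorem pyRange_nil_of_nonpos (x : Int) (h : x ≤ 0) : PySem.List.pyRange 0 x = [] := by
  simp [PySem.List.pyRange, h]

theorem hornerB_init (w : List Char) : ∀ a : Int,
    w.foldl (fun n c => 4 * n + codeOf c) a = a * 4 ^ w.length + patternNumberB w := by
  induction w with
  | nil => intro a; simp [patternNumberB]
  | cons c rest ih =>
    intro a
    simp only [List.foldl_cons, List.length_cons, patternNumberB] at *
    rw [ih (4*a + codeOf c), ih (4*0 + codeOf c)]
    ring

-- A's positional power sum, as a sum over List.range
theorem ptn_sum (w : List Char) :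
    patternToNumber w
      = ((List.range w.length).map
          (fun p => codeOf (w.getD p 'A') * 4 ^ (w.length - 1 - p))).sum := by
  unfold patternToNumber
  rw [PySem.List.foldl_add]
  rw [show ((w.length : Int)) = ((w.length : Nat) : Int) from rfl, PySem.List.pyRange_zero_natCast]
  rw [List.map_map]
  simp only [zero_add]
  apply congrArg
  apply List.map_congr_left
  intro p hp
  have hplt : p < w.length := List.mem_range.mp hp
  simp only [Function.comp_apply, PySem.List.pyGet?_natCast]
  have h1 : ((w.length : Int) - (p:Int) - 1).toNat = w.length - 1 - p := by omega
  have h2 : w[p]?.getD 'A' = w.getD p 'A' := by simp [List.getD]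
  rw [h1, h2]
  rfl

theorem sum_eq_B (w : List Char) :
    ((List.range w.length).map
        (fun p => codeOf (w.getD p 'A') * 4 ^ (w.length - 1 - p))).sum = patternNumberB w := by
  induction w with
  | nil => simp [patternNumberB]
  | cons c rest ih =>
    rw [List.length_cons, List.range_succ_eq_map, List.map_cons, List.map_map, List.sum_cons]
    have hterm : ∀ p ∈ List.range rest.length,
        ((fun p => codeOf ((c :: rest).getD p 'A') * 4 ^ (rest.length + 1 - 1 - p)) ∘ Nat.succ) p
          = codeOf (rest.getD p 'A') * 4 ^ (rest.length - 1 - p) := by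
      intro p hp
      simp only [Function.comp_apply, List.getD_cons_succ]
      have he : rest.length + 1 - 1 - p.succ = rest.length - 1 - p := by omega
      rw [he]
    rw [List.map_congr_left hterm, ih]
    have hB : patternNumberB (c :: rest) = codeOf c * 4 ^ rest.length + patternNumberB rest := by
      simp only [patternNumberB, List.foldl_cons]
      rw [hornerB_init rest (4*0 + codeOf c)]
      norm_num
      rfl
    rw [hB]
    simp only [List.getD_cons_zero, Nat.add_sub_cancel, Nat.sub_zero]

-- the key window fact: A's per-position power sum equals B's Horner fold (same index function)
theorem pn_eq (w : List Char) : patternToNumber w = patternNumberB w := by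
  rw [ptn_sum, sum_eq_B]

theorem freq0_eq (m : Nat) :
    (PySem.List.pyRange 0 ((4:Int) ^ m)).foldl (fun acc _ => acc ++ [(0:Int)]) []
      = (PySem.List.pyRange 0 ((4:Int) ^ m)).map (fun _ => (0:Int)) := by
  rw [PySem.List.foldl_append_singleton_eq_map (f := fun _ => (0:Int))]
  rfl

-- ===== VERDICT (by name: the statement is the Claim_ definition above) =====
theorem computing_freq_spec : Claim_equal_computing_freq := by
  intro genome k d _ hpre
  obtain ⟨hk, hcase⟩ := hpre
  unfold Spec_computing_freq
  simp only [computing_freq, computing_freq_alt]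
  rw [freq0_eq]
  have hbound : ((genome.toList.length : Int)) - (k - 1) = (genome.toList.length : Int) - k + 1 := by
    ring
  rw [hbound]
  rcases hcase with hlt | hk0 | ⟨_, hd0⟩
  · -- no window: both outer loops are empty
    have hempty : PySem.List.pyRange 0 ((genome.toList.length : Int) - k + 1) = [] :=
      pyRange_nil_of_nonpos _ (by omega)
    rw [hempty]
    rfl
  · -- k = 0: every window is the empty pattern
    subst hk0
    apply PySem.List.foldl_congr_mem
    intro acc i _
    have hsl : PySem.List.slice genome.toList (some i) (some (i + 0)) = [] := by
      simp [PySem.List.slice]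
    simp only [hsl]
    have hptn0 : patternToNumber [] = 0 := by decide
    rcases lt_trichotomy d 0 with hdn | hdz | hdp
    · -- d < 0: A's inner test 0 ≤ d fails on the single j; B has no neighbors
      have hne : ¬ (d = 0) := by omega
      have hr1 : PySem.List.pyRange 0 ((4:Int) ^ (0:Int).toNat) = [0] := by decide
      have hnb : neighborNumbers [] d = [] := by
        simp [neighborNumbers, hdn]
      simp only [if_neg hne, hr1, hnb, List.foldl_cons, List.foldl_nil]
      have hhd : hammingDistance [] (numberToPattern 0 0) = 0 := by decide
      rw [hhd]
      rw [if_neg (by omega : ¬ ((0:Int) ≤ d))]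
    · -- d = 0
      subst hdz
      have hnb : neighborNumbers [] 0 = [0] := by decide
      simp [hnb, hptn0]
    · -- d > 0
      have hne : ¬ (d = 0) := by omega
      have hr1 : PySem.List.pyRange 0 ((4:Int) ^ (0:Int).toNat) = [0] := by decide
      have hnb : neighborNumbers [] d = [0] := by
        rw [neighborNumbers]
        rw [if_neg (by omega : ¬ (d < 0)), if_neg hne]
      simp only [if_neg hne, hr1, hnb, List.foldl_cons, List.foldl_nil]
      have hhd : hammingDistance [] (numberToPattern 0 0) = 0 := by decide
      rw [hhd]
      rw [if_pos (by omega : (0:Int) ≤ d)]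
  · -- the main case: d = 0, window index computed two ways
    subst hd0
    apply PySem.List.foldl_congr_mem
    intro acc i _
    have hnb : ∀ w : List Char, neighborNumbers w 0 = [patternNumberB w] := by
      intro w
      rw [neighborNumbers.eq_def]
      norm_num
    simp only [if_true, hnb, List.foldl_cons, List.foldl_nil, pn_eq]

set_option maxRecDepth 2000

theorem computing_freq_raises : Claim_raises_computing_freq := by
  unfold Claim_raises_computing_freq
  constructor
  · rintro genome k d _ ⟨hk1, hkl, hd⟩ ⟨hk0, hlt | hk0' | ⟨_, hd0⟩⟩ <;> omega
  · refine ⟨by decide, by decide, by decide⟩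

-- the witness component of the crash-fix claim, re-stated directly (self-check of computing_freq_raises)
theorem computing_freq_raises_witness_ok :
    computing_freq_alt (pvRaiseWitness_computing_freq.1) (pvRaiseWitness_computing_freq.2.1)
      (pvRaiseWitness_computing_freq.2.2) = pvRaiseWitnessOut_computing_freq :=
  computing_freq_raises.2.2.2
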